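-- pv_equiv track=rewrite | github.com/fanhuan/script | bam_to_single_contig.py | build_offsets
-- ===== SOURCE A (Python) =====
-- def build_offsets(sq_pairs, spacer):
--     offsets = {}
--     pads = []
--     running = 0
--     for i, (name, ln) in enumerate(sq_pairs):
--         offsets[name] = running
--         running += ln
--         if i != len(sq_pairs) - 1 and spacer > 0:
--             pads.append((running, running + spacer))
--             running += spacer
--     total_len = running
--     return offsets, pads, total_len
-- ===== SOURCE B (Python) =====
-- def build_offsets(sq_pairs, spacer):
--     # Back-to-front construction: compute the total length first, then walk the
--     # contigs in REVERSE, deriving each start offset by subtracting from the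
--     # running end position, and reverse the collected items/pads at the end.
--     gap = spacer if spacer > 0 else 0
--     total_len = 0
--     for _, ln in sq_pairs:
--         total_len += ln + gap
--     if sq_pairs:
--         total_len -= gap
--     rev_items = []
--     rev_pads = []
--     end = total_len
--     last = True
--     for name, ln in reversed(sq_pairs):
--         start = end - ln
--         if not last and gap:
--             rev_pads.append((end, end + gap))
--         rev_items.append((name, start))
--         end = start - gap
--         last = False
--     offsets = dict(reversed(rev_items))
--     pads = rev_pads[::-1]
--     return offsets, pads, total_len
-- ===== Notes on version B (the rewrite author's own statement) =====
-- stated objective: alternative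
-- what changed: Replaced A's single forward running-counter loop by a back-to-front construction: the total length is computed first, then a reverse traversal derives each start offset by subtracting lengths and gaps from the running end position, collecting items and pads backwards and reversing them at the end.
import Mathlib
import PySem

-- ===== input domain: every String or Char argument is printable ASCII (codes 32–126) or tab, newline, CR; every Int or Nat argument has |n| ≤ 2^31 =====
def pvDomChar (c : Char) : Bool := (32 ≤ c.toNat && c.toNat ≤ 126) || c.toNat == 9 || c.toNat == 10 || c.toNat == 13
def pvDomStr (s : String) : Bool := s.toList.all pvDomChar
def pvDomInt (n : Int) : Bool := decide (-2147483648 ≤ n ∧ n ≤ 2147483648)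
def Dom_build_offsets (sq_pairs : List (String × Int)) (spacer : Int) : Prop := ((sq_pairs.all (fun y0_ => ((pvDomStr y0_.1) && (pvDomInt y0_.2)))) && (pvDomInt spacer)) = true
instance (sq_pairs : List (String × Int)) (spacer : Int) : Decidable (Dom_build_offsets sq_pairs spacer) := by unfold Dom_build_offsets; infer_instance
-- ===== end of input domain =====

-- B replaces A's forward running-counter loop by a back-to-front construction:
-- the total length is computed first, then a reverse traversal derives each
-- start offset from the running end position (alternative decomposition).

-- ===== PORT A =====
-- the for-loop over enumerate(sq_pairs) with state (offsets, pads, running)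
def buildA_loop (rest : List (String × Int)) (i n spacer : Int)
    (offsets : PySem.Dict String Int) (pads : List (Int × Int)) (running : Int) :
    PySem.Dict String Int × List (Int × Int) × Int :=
  match rest with
  | [] => (offsets, pads, running)
  | (name, ln) :: rest' =>
    if i ≠ n - 1 ∧ spacer > 0 then
      buildA_loop rest' (i + 1) n spacer (offsets.insert name running)
        (pads ++ [(running + ln, running + ln + spacer)]) (running + ln + spacer)
    else
      buildA_loop rest' (i + 1) n spacer (offsets.insert name running) pads (running + ln)

def build_offsets (sq_pairs : List (String × Int)) (spacer : Int) :
    (List (String × Int)) × (List (Int × Int)) × Int :=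
  let r := buildA_loop sq_pairs 0 (sq_pairs.length : Int) spacer PySem.Dict.empty [] 0
  (r.1.items, r.2.1, r.2.2)

-- ===== PORT B =====
-- Source B's first loop: total_len += ln + gap
def goTotal (pairs : List (String × Int)) (gap acc : Int) : Int :=
  match pairs with
  | [] => acc
  | (_, ln) :: rest => goTotal rest gap (acc + ln + gap)

-- Source B's reverse loop with state (rev_pads, rev_items, end, last)
def goBack (pairs : List (String × Int)) (gap : Int)
    (revPads : List (Int × Int)) (revItems : List (String × Int)) (endv : Int) (last : Bool) :
    List (Int × Int) × List (String × Int) :=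
  match pairs with
  | [] => (revPads, revItems)
  | (name, ln) :: rest =>
    let start := endv - ln
    let revPads' := if last = false ∧ gap ≠ 0 then revPads ++ [(endv, endv + gap)] else revPads
    goBack rest gap revPads' (revItems ++ [(name, start)]) (start - gap) false

def build_offsets_alt (sq_pairs : List (String × Int)) (spacer : Int) :
    (List (String × Int)) × (List (Int × Int)) × Int :=
  let gap := if spacer > 0 then spacer else 0
  let t0 := goTotal sq_pairs gap 0
  let total := if sq_pairs ≠ [] then t0 - gap else t0
  let r := goBack sq_pairs.reverse gap [] [] total true
  -- dict(reversed(rev_items)); rev_pads[::-1] is List.reverse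
  ((PySem.Dict.ofList r.2.reverse).items, r.1.reverse, total)

-- ===== PRECONDITION & SPEC =====
def Spec_build_offsets (sq_pairs : List (String × Int)) (spacer : Int) (out : (List (String × Int)) × (List (Int × Int)) × Int) : Prop := out = build_offsets_alt sq_pairs spacer
instance (sq_pairs : List (String × Int)) (spacer : Int) (out : (List (String × Int)) × (List (Int × Int)) × Int) : Decidable (Spec_build_offsets sq_pairs spacer out) := by unfold Spec_build_offsets; infer_instance

-- ===== CLAIM (what is proved, stated in full; the proofs are below) =====
def Claim_equal_build_offsets : Prop := ∀ (sq_pairs : List (String × Int)) (spacer : Int), Dom_build_offsets sq_pairs spacer → Spec_build_offsets sq_pairs spacer (build_offsets sq_pairs spacer)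

-- ===== LEMMAS AND PROOFS =====

-- closed forms for A's loop
def pvOffs (pairs : List (String × Int)) (step r : Int)
    (d : PySem.Dict String Int) : PySem.Dict String Int :=
  match pairs with
  | [] => d
  | (name, ln) :: rest => pvOffs rest step (r + ln + step) (d.insert name r)

def pvPads (pairs : List (String × Int)) (spacer r : Int) : List (Int × Int) :=
  match pairs with
  | [] => []
  | (_, ln) :: rest =>
    if rest.isEmpty then []
    else (r + ln, r + ln + spacer) :: pvPads rest spacer (r + ln + spacer)

def pvRun (pairs : List (String × Int)) (step r : Int) : Int :=
  match pairs with
  | [] => r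
  | (_, ln) :: rest =>
    if rest.isEmpty then r + ln else pvRun rest step (r + ln + step)

-- the (name, start) sequence in forward order
def pvSeq (pairs : List (String × Int)) (step r : Int) : List (String × Int) :=
  match pairs with
  | [] => []
  | (name, ln) :: rest => (name, r) :: pvSeq rest step (r + ln + step)

-- pads of a list all of whose elements are followed by another element
def padsAll (pairs : List (String × Int)) (gap r : Int) : List (Int × Int) :=
  match pairs with
  | [] => []
  | (_, ln) :: rest => (r + ln, r + ln + gap) :: padsAll rest gap (r + ln + gap)

-- closed forms for B's reverse loop
def bItems (pairs : List (String × Int)) (gap E : Int) : List (String × Int) :=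
  match pairs with
  | [] => []
  | (name, ln) :: rest => (name, E - ln) :: bItems rest gap (E - ln - gap)

def bPads (pairs : List (String × Int)) (gap E : Int) (last : Bool) : List (Int × Int) :=
  match pairs with
  | [] => []
  | (_, ln) :: rest =>
    (if last = false ∧ gap ≠ 0 then [(E, E + gap)] else []) ++ bPads rest gap (E - ln - gap) false

lemma pvRun_cons0 (name : String) (ln r : Int) (rest : List (String × Int)) :
    pvRun ((name, ln) :: rest) 0 r = pvRun rest 0 (r + ln) := by
  cases rest <;> simp [pvRun]

lemma buildA_pos (spacer : Int) (hs : 0 < spacer) :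
    ∀ (pairs : List (String × Int)) (i n : Int), n = i + pairs.length →
    ∀ d pads r, buildA_loop pairs i n spacer d pads r =
      (pvOffs pairs spacer r d, pads ++ pvPads pairs spacer r, pvRun pairs spacer r) := by
  intro pairs
  induction pairs with
  | nil => intro i n _ d pads r; simp [buildA_loop, pvOffs, pvPads, pvRun]
  | cons p rest ih =>
    intro i n hn d pads r
    obtain ⟨name, ln⟩ := p
    cases rest with
    | nil =>
      have hi : ¬ (i ≠ n - 1 ∧ spacer > 0) := by
        simp at hn; omega
      simp [buildA_loop, hi, pvOffs, pvPads, pvRun]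
    | cons q rest' =>
      obtain ⟨qn, ql⟩ := q
      have hi : i ≠ n - 1 ∧ spacer > 0 := by
        constructor
        · simp [List.length] at hn; omega
        · exact hs
      have hn' : n = (i + 1) + (((qn, ql) :: rest').length : Int) := by
        simp [List.length] at hn ⊢; omega
      rw [buildA_loop, if_pos hi, ih (i + 1) n hn']
      refine Prod.ext ?_ (Prod.ext ?_ ?_)
      · rfl
      · show (pads ++ [(r + ln, r + ln + spacer)]) ++ pvPads ((qn, ql) :: rest') spacer (r + ln + spacer)
            = pads ++ pvPads ((name, ln) :: (qn, ql) :: rest') spacer r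
        rw [List.append_assoc]
        congr 1
      · rfl

lemma buildA_nonpos (spacer : Int) (hs : ¬ 0 < spacer) :
    ∀ (pairs : List (String × Int)) (i n : Int) (d : PySem.Dict String Int) pads r,
    buildA_loop pairs i n spacer d pads r =
      (pvOffs pairs 0 r d, pads, pvRun pairs 0 r) := by
  intro pairs
  induction pairs with
  | nil => intro i n d pads r; simp [buildA_loop, pvOffs, pvRun]
  | cons p rest ih =>
    intro i n d pads r
    obtain ⟨name, ln⟩ := p
    have hi : ¬ (i ≠ n - 1 ∧ spacer > 0) := by
      intro h; exact hs h.2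
    rw [buildA_loop, if_neg hi, ih, pvRun_cons0]
    have : r + ln + 0 = r + ln := by ring
    simp [pvOffs, this]

-- A's dict is the fold of the forward (name, start) sequence
lemma pvOffs_foldSeq : ∀ (pairs : List (String × Int)) (step r : Int) (d : PySem.Dict String Int),
    pvOffs pairs step r d =
      (pvSeq pairs step r).foldl (fun (d : PySem.Dict String Int) p => d.insert p.1 p.2) d := by
  intro pairs
  induction pairs with
  | nil => intro step r d; simp [pvOffs, pvSeq]
  | cons p rest ih =>
    intro step r d
    obtain ⟨name, ln⟩ := p
    simp [pvOffs, pvSeq, ih]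

-- B's reverse loop in terms of its closed forms
lemma goBack_spec : ∀ (pairs : List (String × Int)) (gap : Int) rp ri (E : Int) (f : Bool),
    goBack pairs gap rp ri E f = (rp ++ bPads pairs gap E f, ri ++ bItems pairs gap E) := by
  intro pairs
  induction pairs with
  | nil => intro gap rp ri E f; simp [goBack, bPads, bItems]
  | cons p rest ih =>
    intro gap rp ri E f
    obtain ⟨name, ln⟩ := p
    rw [goBack, ih]
    by_cases hf : f = false ∧ gap ≠ 0
    · simp [bPads, bItems, hf, List.append_assoc]
    · simp [bPads, bItems, hf, List.append_assoc]

lemma pvRun_snoc : ∀ (pairs : List (String × Int)) (m : String) (k gap r : Int),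
    pvRun (pairs ++ [(m, k)]) gap r = goTotal pairs gap r + k := by
  intro pairs
  induction pairs with
  | nil => intro m k gap r; simp [pvRun, goTotal]
  | cons p rest ih =>
    intro m k gap r
    obtain ⟨name, ln⟩ := p
    rw [List.cons_append, pvRun]
    have h : ((rest ++ [(m, k)] : List (String × Int)).isEmpty) = false := by simp
    rw [h]
    simp only [Bool.false_eq_true, if_false]
    rw [ih]
    rfl

lemma goTotal_pvRun : ∀ (pairs : List (String × Int)) (gap r : Int), pairs ≠ [] →
    goTotal pairs gap r = pvRun pairs gap r + gap := by
  intro pairs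
  induction pairs with
  | nil => intro gap r h; exact absurd rfl h
  | cons p rest ih =>
    intro gap r _
    obtain ⟨name, ln⟩ := p
    cases rest with
    | nil => simp [goTotal, pvRun]
    | cons q rest' =>
      rw [goTotal, pvRun]
      simp only [List.isEmpty_cons, Bool.false_eq_true, if_false]
      exact ih gap (r + ln + gap) (by simp)

lemma pvSeq_snoc : ∀ (pairs : List (String × Int)) (m : String) (k gap r : Int),
    pvSeq (pairs ++ [(m, k)]) gap r = pvSeq pairs gap r ++ [(m, goTotal pairs gap r)] := by
  intro pairs
  induction pairs with
  | nil => intro m k gap r; simp [pvSeq, goTotal]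
  | cons p rest ih =>
    intro m k gap r
    obtain ⟨name, ln⟩ := p
    simp [pvSeq, goTotal, ih]

lemma padsAll_snoc : ∀ (pairs : List (String × Int)) (m : String) (k gap r : Int),
    padsAll (pairs ++ [(m, k)]) gap r =
      padsAll pairs gap r ++ [(goTotal pairs gap r + k, goTotal pairs gap r + k + gap)] := by
  intro pairs
  induction pairs with
  | nil => intro m k gap r; simp [padsAll, goTotal]
  | cons p rest ih =>
    intro m k gap r
    obtain ⟨name, ln⟩ := p
    simp [padsAll, goTotal, ih]

lemma pvPads_snoc : ∀ (pairs : List (String × Int)) (q : String × Int) (gap r : Int),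
    pvPads (pairs ++ [q]) gap r = padsAll pairs gap r := by
  intro pairs
  induction pairs with
  | nil => intro q gap r; simp [pvPads, padsAll]
  | cons p rest ih =>
    intro q gap r
    obtain ⟨name, ln⟩ := p
    rw [List.cons_append, pvPads]
    have h : ((rest ++ [q] : List (String × Int)).isEmpty) = false := by simp
    rw [h]
    simp only [Bool.false_eq_true, if_false]
    rw [ih]
    rfl

lemma bItems_rev (pairs : List (String × Int)) : ∀ (gap r E : Int),
    (pairs ≠ [] → E = pvRun pairs gap r) →
    bItems pairs.reverse gap E = (pvSeq pairs gap r).reverse := by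
  induction pairs using List.reverseRecOn with
  | nil => intro gap r E _; simp [bItems, pvSeq]
  | append_singleton S q ih =>
    intro gap r E hE
    obtain ⟨m, k⟩ := q
    have hE' : E = goTotal S gap r + k := by
      rw [hE (by simp), pvRun_snoc]
    subst hE'
    rw [List.reverse_append, List.reverse_singleton, List.singleton_append, bItems,
      pvSeq_snoc, List.reverse_append, List.reverse_singleton, List.singleton_append]
    rw [show goTotal S gap r + k - k = goTotal S gap r by omega]
    congr 1
    apply ih
    intro hS
    rw [goTotal_pvRun S gap r hS]
    omega

lemma bPads_rev (pairs : List (String × Int)) : ∀ (gap r E : Int), gap ≠ 0 →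
    (pairs ≠ [] → E = pvRun pairs gap r) →
    bPads pairs.reverse gap E false = (padsAll pairs gap r).reverse := by
  induction pairs using List.reverseRecOn with
  | nil => intro gap r E _ _; simp [bPads, padsAll]
  | append_singleton S q ih =>
    intro gap r E hg hE
    obtain ⟨m, k⟩ := q
    have hE' : E = goTotal S gap r + k := by
      rw [hE (by simp), pvRun_snoc]
    subst hE'
    rw [List.reverse_append, List.reverse_singleton, List.singleton_append, bPads,
      padsAll_snoc, List.reverse_append, List.reverse_singleton, List.singleton_append,
      if_pos ⟨rfl, hg⟩, List.singleton_append]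
    rw [show goTotal S gap r + k - k - gap = goTotal S gap r - gap by omega]
    congr 1
    apply ih _ _ _ hg
    intro hS
    rw [goTotal_pvRun S gap r hS]
    omega

lemma bPads_true_rev (pairs : List (String × Int)) (gap r E : Int) (hg : gap ≠ 0)
    (hE : pairs ≠ [] → E = pvRun pairs gap r) :
    bPads pairs.reverse gap E true = (pvPads pairs gap r).reverse := by
  induction pairs using List.reverseRecOn with
  | nil => simp [bPads, pvPads]
  | append_singleton S q ih =>
    obtain ⟨m, k⟩ := q
    have hE' : E = goTotal S gap r + k := by
      rw [hE (by simp), pvRun_snoc]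
    rw [List.reverse_append, List.reverse_singleton, List.singleton_append, bPads,
      if_neg (by simp), List.nil_append, pvPads_snoc]
    apply bPads_rev S gap r _ hg
    intro hS
    rw [goTotal_pvRun S gap r hS] at hE'
    omega

lemma bPads_zero : ∀ (pairs : List (String × Int)) (E : Int) (f : Bool),
    bPads pairs 0 E f = [] := by
  intro pairs
  induction pairs with
  | nil => intro E f; simp [bPads]
  | cons p rest ih =>
    intro E f
    obtain ⟨name, ln⟩ := p
    simp [bPads, ih]

-- ===== VERDICT (by name: the statement is the Claim_ definition above) =====
theorem build_offsets_spec : Claim_equal_build_offsets := by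
  intro sq spacer _
  unfold Spec_build_offsets
  cases hsq : sq with
  | nil =>
    by_cases hs : 0 < spacer <;>
      · simp [build_offsets, build_offsets_alt, buildA_loop, goTotal, goBack, hs]
        rfl
  | cons p rest =>
    rw [← hsq]
    have hne : sq ≠ [] := by rw [hsq]; simp
    by_cases hs : 0 < spacer
    · -- spacer > 0 : gap = spacer
      simp only [build_offsets, build_offsets_alt, if_pos hs, if_pos hne]
      rw [buildA_pos spacer hs sq 0 (sq.length : Int) (by simp) PySem.Dict.empty [] 0,
        goBack_spec]
      have hT : goTotal sq spacer 0 - spacer = pvRun sq spacer 0 := by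
        rw [goTotal_pvRun sq spacer 0 hne]; omega
      rw [hT,
        bItems_rev sq spacer 0 _ (fun _ => rfl),
        bPads_true_rev sq spacer 0 _ (by omega) (fun _ => rfl)]
      dsimp only
      simp only [List.nil_append, List.reverse_reverse]
      rw [pvOffs_foldSeq]
      rfl
    · -- spacer ≤ 0 : gap = 0
      simp only [build_offsets, build_offsets_alt, if_neg hs, if_pos hne]
      rw [buildA_nonpos spacer hs sq 0 (sq.length : Int) PySem.Dict.empty [] 0,
        goBack_spec]
      have hT : goTotal sq 0 0 - 0 = pvRun sq 0 0 := by
        rw [goTotal_pvRun sq 0 0 hne]; omega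
      rw [hT,
        bItems_rev sq 0 0 _ (fun _ => rfl),
        bPads_zero]
      dsimp only
      simp only [List.nil_append, List.reverse_reverse]
      rw [pvOffs_foldSeq]
      rfl
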